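-- pv_equiv track=rewrite | github.com/agh-bit-academy/SummerProject2022 | WDI/Zestaw_4/Zadanie_11/sol.py | f
-- ===== SOURCE A (Python) =====
-- def f(T):
--     lencol = len(T)
--     lenrow = len(T[0])
--     counter = 0
--     digits = [[[False] * 10 for _ in range(lenrow)] for _ in range(lencol)]
--     for y in range(lencol):
--         for x in range(lenrow):
--             num = T[y][x]
--             while num != 0:
--                 digits[y][x][num % 10] = True
--                 num //= 10
--
--     for y in range(lencol):
--         for x in range(lenrow):
--             if x != 0 and digits[y][x] != digits[y][x - 1]:
--                 continue
--             if y != 0 and digits[y][x] != digits[y - 1][x]: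
--                 continue
--             if x != lenrow - 1 and digits[y][x] != digits[y][x + 1]:
--                 continue
--             if y != lencol - 1 and digits[y][x] != digits[y + 1][x]:
--                 continue
--             counter += 1
--     return counter
-- ===== SOURCE B (Python) =====
-- def f(T):
--     h = len(T)
--     w = len(T[0])
--
--     def digit_key(v):
--         s = set()
--         while v != 0:
--             s.add(v % 10)
--             v //= 10
--         return tuple(sorted(s))
--
--     M = [[digit_key(T[y][x]) for x in range(w)] for y in range(h)]
--
--     disq = set()
--     for y in range(h):
--         for x in range(w - 1):
--             if M[y][x] != M[y][x + 1]:
--                 disq.add((y, x))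
--                 disq.add((y, x + 1))
--     for y in range(h - 1):
--         for x in range(w):
--             if M[y][x] != M[y + 1][x]:
--                 disq.add((y, x))
--                 disq.add((y + 1, x))
--
--     return sum(1 for y in range(h) for x in range(w) if (y, x) not in disq)
-- ===== Notes on version B (the rewrite author's own statement) =====
-- stated objective: alternative
-- what changed: B replaces A's per-cell four-guard continue chain over a bool[10] digit grid by an edge-oriented pass: per-cell sorted-digit-tuple keys, one sweep over every horizontal and vertical adjacent pair marking both endpoints in a disqualified set, then a count of never-marked cells.
import Mathlib
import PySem

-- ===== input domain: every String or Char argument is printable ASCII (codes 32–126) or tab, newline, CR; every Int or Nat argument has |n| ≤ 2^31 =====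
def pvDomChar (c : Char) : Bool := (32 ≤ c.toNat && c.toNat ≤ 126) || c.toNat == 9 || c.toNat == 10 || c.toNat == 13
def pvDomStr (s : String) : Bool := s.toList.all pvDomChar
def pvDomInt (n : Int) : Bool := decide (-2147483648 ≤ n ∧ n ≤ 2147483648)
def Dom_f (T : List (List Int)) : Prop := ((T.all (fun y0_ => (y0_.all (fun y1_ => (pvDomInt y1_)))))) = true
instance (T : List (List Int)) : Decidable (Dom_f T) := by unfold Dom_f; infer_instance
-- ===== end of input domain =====

-- B replaces A's per-cell four-guard scan of a bool[10] digit grid by sorted-digit keys, one pass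
-- over adjacent pairs marking both endpoints of each unequal pair in a 'disq' set, then a count of
-- unmarked cells (alternative decomposition, similar cost).

-- ===== PORT A =====
-- digits[y][x] (chained pyGetD, default [])
def fGet (g : List (List (List Bool))) (y x : Int) : List Bool :=
  PySem.List.pyGetD (PySem.List.pyGetD g y []) x []

-- digits[y][x] = c (inner row rebuilt, then written back)
def fSet (g : List (List (List Bool))) (y x : Int) (c : List Bool) : List (List (List Bool)) :=
  PySem.List.pySetD g y (PySem.List.pySetD (PySem.List.pyGetD g y []) x c)

-- 'while num != 0: digits[y][x][num % 10] = True; num //= 10'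
-- (the 0 < num guard totalizes the recursion; for num < 0 Python diverges — excluded by Pre_f)
def fWhile (y x num : Int) (g : List (List (List Bool))) : List (List (List Bool)) :=
  if h : 0 < num then
    fWhile y x (PySem.Int.floordiv num 10)
      (fSet g y x (PySem.List.pySetD (fGet g y x) (PySem.Int.mod num 10) true))
  else g
termination_by num.toNat
decreasing_by
  have := PySem.Int.floordiv_eq_ediv_of_pos (a := num) (b := 10) (by omega)
  rw [this]; omega

def f (T : List (List Int)) : Int :=
  let lencol : Int := PySem.List.len T
  let lenrow : Int := PySem.List.len (PySem.List.pyGetD T 0 [])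
  let digits0 : List (List (List Bool)) :=
    (PySem.List.pyRange 0 lencol 1).map (fun _ =>
      (PySem.List.pyRange 0 lenrow 1).map (fun _ => List.replicate 10 false))
  let digits :=
    (PySem.List.pyRange 0 lencol 1).foldl (fun g y =>
      (PySem.List.pyRange 0 lenrow 1).foldl (fun g x =>
        fWhile y x (PySem.List.pyGetD (PySem.List.pyGetD T y []) x 0) g) g) digits0
  (PySem.List.pyRange 0 lencol 1).foldl (fun c y =>
    (PySem.List.pyRange 0 lenrow 1).foldl (fun c x =>
      if x ≠ 0 ∧ fGet digits y x ≠ fGet digits y (x - 1) then c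
      else if y ≠ 0 ∧ fGet digits y x ≠ fGet digits (y - 1) x then c
      else if x ≠ lenrow - 1 ∧ fGet digits y x ≠ fGet digits y (x + 1) then c
      else if y ≠ lencol - 1 ∧ fGet digits y x ≠ fGet digits (y + 1) x then c
      else c + 1) c) 0

-- ===== PORT B =====
-- 'while v != 0: s.add(v % 10); v //= 10'  (0 < v guard totalizes; Python diverges for v < 0, excluded by Pre_f)
def digitSetLoop (v : Int) (s : PySem.Set Int) : PySem.Set Int :=
  if h : 0 < v then
    digitSetLoop (PySem.Int.floordiv v 10) (PySem.Set.add s (PySem.Int.mod v 10))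
  else s
termination_by v.toNat
decreasing_by
  have := PySem.Int.floordiv_eq_ediv_of_pos (a := v) (b := 10) (by omega)
  rw [this]; omega

-- tuple(sorted(s))
def digitKey (v : Int) : List Int :=
  PySem.List.sorted (digitSetLoop v PySem.Set.empty) (fun d => d) false

def f_alt (T : List (List Int)) : Int :=
  let h : Int := PySem.List.len T
  let w : Int := PySem.List.len (PySem.List.pyGetD T 0 [])
  let M : List (List (List Int)) :=
    (PySem.List.pyRange 0 h 1).map (fun y =>
      (PySem.List.pyRange 0 w 1).map (fun x =>
        digitKey (PySem.List.pyGetD (PySem.List.pyGetD T y []) x 0)))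
  let getM := fun (y x : Int) => PySem.List.pyGetD (PySem.List.pyGetD M y []) x []
  let disqH : PySem.Set (Int × Int) :=
    (PySem.List.pyRange 0 h 1).foldl (fun s y =>
      (PySem.List.pyRange 0 (w - 1) 1).foldl (fun s x =>
        if getM y x ≠ getM y (x + 1) then
          PySem.Set.add (PySem.Set.add s (y, x)) (y, x + 1)
        else s) s) PySem.Set.empty
  let disq : PySem.Set (Int × Int) :=
    (PySem.List.pyRange 0 (h - 1) 1).foldl (fun s y =>
      (PySem.List.pyRange 0 w 1).foldl (fun s x =>
        if getM y x ≠ getM (y + 1) x then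
          PySem.Set.add (PySem.Set.add s (y, x)) (y + 1, x)
        else s) s) disqH
  (PySem.List.pyRange 0 h 1).foldl (fun c y =>
    (PySem.List.pyRange 0 w 1).foldl (fun c x =>
      if (y, x) ∉ disq then c + 1 else c) c) 0

-- ===== PRECONDITION & SPEC =====
-- Pre_f excludes exactly the inputs where A does not return: the empty grid (len(T[0]) raises
-- IndexError), a row shorter than row 0 (T[y][x] raises IndexError), and a negative value in the
-- first len(T[0]) columns (A's digit-extraction while loop diverges there).
def Pre_f (T : List (List Int)) : Prop :=
  T ≠ [] ∧ ∀ row ∈ T, T.headI.length ≤ row.length ∧ ∀ v ∈ row.take T.headI.length, 0 ≤ v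
instance (T : List (List Int)) : Decidable (Pre_f T) := by unfold Pre_f; infer_instance

def pvWitness_f : List (List Int) := [[12, 21], [102, 0]]

def Spec_f (T : List (List Int)) (out : Int) : Prop := out = f_alt T
instance (T : List (List Int)) (out : Int) : Decidable (Spec_f T out) := by unfold Spec_f; infer_instance

-- ===== CLAIM (what is proved, stated in full; the proofs are below) =====
def Claim_equal_f : Prop := ∀ (T : List (List Int)), Dom_f T → Pre_f T → Spec_f T (f T)

-- ===== LEMMAS AND PROOFS =====

-- proof-only helpers ----------------------------------------------------------

-- digit-membership predicate shared by both characterizations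
def hasDigit (v d : Int) : Bool :=
  if h : 0 < v then (PySem.Int.mod v 10 == d) || hasDigit (PySem.Int.floordiv v 10) d
  else false
termination_by v.toNat
decreasing_by
  have := PySem.Int.floordiv_eq_ediv_of_pos (a := v) (b := 10) (by omega)
  rw [this]; omega

-- the cell-local form of A's while loop
def whileCell (num : Int) (c : List Bool) : List Bool :=
  if h : 0 < num then
    whileCell (PySem.Int.floordiv num 10) (c.set (PySem.Int.mod num 10).toNat true)
  else c
termination_by num.toNat
decreasing_by
  have := PySem.Int.floordiv_eq_ediv_of_pos (a := num) (b := 10) (by omega)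
  rw [this]; omega

-- Nat-indexed 2D get/set used by the grid invariants
def g2 (g : List (List (List Bool))) (y x : Nat) : List Bool := (g.getD y []).getD x []
def s2 (g : List (List (List Bool))) (y x : Nat) (c : List Bool) : List (List (List Bool)) :=
  g.set y ((g.getD y []).set x c)

def tval (T : List (List Int)) (y x : Int) : Int :=
  PySem.List.pyGetD (PySem.List.pyGetD T y []) x 0

def keyAt (T : List (List Int)) (y x : Int) : List Int := digitKey (tval T y x)

lemma length_whileCell (num : Int) (c : List Bool) : (whileCell num c).length = c.length := by
  induction num, c using whileCell.induct with
  | case1 num c h ih => rw [whileCell]; simp only [dif_pos h]; rw [ih]; simp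
  | case2 num c h => rw [whileCell]; simp only [dif_neg h]

lemma getD_whileCell (num : Int) (c : List Bool) (hc : c.length = 10) (d : Nat) (hd : d < 10) :
    (whileCell num c).getD d false = (c.getD d false || hasDigit num (d : Int)) := by
  induction num, c using whileCell.induct with
  | case1 num c h ih =>
    have h0 := PySem.Int.mod_nonneg (a := num) (b := 10) (by norm_num)
    have h1 := PySem.Int.mod_lt (a := num) (b := 10) (by norm_num)
    rw [whileCell]; simp only [dif_pos h]
    rw [ih (by simp [hc])]
    conv_rhs => rw [hasDigit]
    simp only [dif_pos h]
    by_cases hmd : (PySem.Int.mod num 10).toNat = d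
    · have hm : PySem.Int.mod num 10 = (d : Int) := by omega
      have hset : (c.set (PySem.Int.mod num 10).toNat true).getD d false = true := by
        rw [← hmd, List.getD_eq_getElem?_getD, List.getElem?_set_self (by omega)]
        rfl
      rw [hset, hm]
      simp
    · have hne : (PySem.Int.mod num 10 == (d : Int)) = false := by
        simp only [beq_eq_false_iff_ne]; omega
      have hset : (c.set (PySem.Int.mod num 10).toNat true).getD d false = c.getD d false := by
        rw [List.getD_eq_getElem?_getD, List.getElem?_set_ne hmd, ← List.getD_eq_getElem?_getD]
      rw [hset, hne]
      simp
  | case2 num c h =>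
    rw [whileCell]; rw [hasDigit]; simp only [dif_neg h]; simp

lemma hasDigit_out (v d : Int) (h : d < 0 ∨ 10 ≤ d) : hasDigit v d = false := by
  induction v using hasDigit.induct with
  | case1 v hv ih =>
    have h0 := PySem.Int.mod_nonneg (a := v) (b := 10) (by norm_num)
    have h1 := PySem.Int.mod_lt (a := v) (b := 10) (by norm_num)
    rw [hasDigit]; simp only [dif_pos hv]
    have hb : (PySem.Int.mod v 10 == d) = false := by simp only [beq_eq_false_iff_ne]; omega
    simp only [hb, Bool.false_or]
    exact ih
  | case2 v hv => rw [hasDigit]; simp [hv]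

lemma whileCell_eq_iff (a b : Int) :
    whileCell a (List.replicate 10 false) = whileCell b (List.replicate 10 false) ↔
      ∀ d : Nat, d < 10 → hasDigit a (d : Int) = hasDigit b (d : Int) := by
  constructor
  · intro h d hd
    have h1 : (whileCell a (List.replicate 10 false)).getD d false
        = (whileCell b (List.replicate 10 false)).getD d false := by rw [h]
    rw [getD_whileCell _ _ (by simp) d hd, getD_whileCell _ _ (by simp) d hd] at h1
    have hr : (List.replicate 10 false).getD d false = false := by
      rw [List.getD_eq_getElem?_getD, List.getElem?_replicate]; simp [hd]
    rw [hr] at h1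
    simpa using h1
  · intro h
    apply List.ext_getElem (by simp [length_whileCell])
    intro i h1 h2
    have hi : i < 10 := by simpa [length_whileCell] using h1
    rw [← List.getD_eq_getElem _ false h1, ← List.getD_eq_getElem _ false h2]
    rw [getD_whileCell _ _ (by simp) i hi, getD_whileCell _ _ (by simp) i hi, h i hi]

lemma mem_digitSetLoop (v : Int) (s : PySem.Set Int) (d : Int) :
    d ∈ digitSetLoop v s ↔ d ∈ s ∨ hasDigit v d = true := by
  induction v, s using digitSetLoop.induct with
  | case1 v s hv ih =>
    rw [digitSetLoop, dif_pos hv, ih]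
    conv_rhs => rw [hasDigit, dif_pos hv]
    simp only [PySem.Set.mem_add, Bool.or_eq_true, beq_iff_eq]
    constructor
    · rintro ((hs | he) | hh) <;> tauto
    · rintro (hs | (he | hh)) <;> tauto
  | case2 v s hv =>
    rw [digitSetLoop, dif_neg hv, hasDigit, dif_neg hv]
    simp

lemma nodup_digitSetLoop (v : Int) (s : PySem.Set Int) (hs : s.Nodup) :
    (digitSetLoop v s).Nodup := by
  induction v, s using digitSetLoop.induct with
  | case1 v s hv ih => rw [digitSetLoop]; simp only [dif_pos hv]; exact ih (PySem.Set.nodup_add _ _ hs)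
  | case2 v s hv => rw [digitSetLoop]; simp only [dif_neg hv]; exact hs

lemma digitKey_eq_iff (a b : Int) :
    digitKey a = digitKey b ↔ ∀ d : Int, hasDigit a d = hasDigit b d := by
  unfold digitKey
  constructor
  · intro h d
    have hm : d ∈ PySem.List.sorted (digitSetLoop a PySem.Set.empty) (fun d => d) false ↔
        d ∈ PySem.List.sorted (digitSetLoop b PySem.Set.empty) (fun d => d) false := by rw [h]
    simp only [PySem.List.mem_sorted, mem_digitSetLoop] at hm
    simp only [PySem.Set.empty, List.not_mem_nil, false_or] at hm
    cases ha : hasDigit a d <;> cases hb : hasDigit b d <;> simp [ha, hb] at hm ⊢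
  · intro h
    have hperm : (digitSetLoop a PySem.Set.empty).Perm (digitSetLoop b PySem.Set.empty) := by
      rw [List.perm_ext_iff_of_nodup (nodup_digitSetLoop _ _ (by simp [PySem.Set.empty]))
        (nodup_digitSetLoop _ _ (by simp [PySem.Set.empty]))]
      intro d
      simp [mem_digitSetLoop, PySem.Set.empty, h d]
    exact PySem.List.sorted_eq_sorted_of_perm _ _ _ (fun x y hxy => hxy) hperm

lemma cell_eq_iff_key_eq (a b : Int) :
    whileCell a (List.replicate 10 false) = whileCell b (List.replicate 10 false) ↔
      digitKey a = digitKey b := by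
  rw [whileCell_eq_iff, digitKey_eq_iff]
  constructor
  · intro h d
    by_cases hd : 0 ≤ d ∧ d < 10
    · have := h d.toNat (by omega)
      rwa [Int.toNat_of_nonneg hd.1] at this
    · rw [hasDigit_out a d (by omega), hasDigit_out b d (by omega)]
  · intro h d _
    exact h d


-- ---- Nat-indexed 2D get/set lemmas ----

lemma getD_set_self {α : Type} (l : List α) (i : Nat) (a d : α) (h : i < l.length) :
    (l.set i a).getD i d = a := by
  rw [List.getD_eq_getElem?_getD, List.getElem?_set_self h, Option.getD_some]

lemma getD_set_ne {α : Type} (l : List α) (i j : Nat) (a d : α) (h : i ≠ j) :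
    (l.set i a).getD j d = l.getD j d := by
  rw [List.getD_eq_getElem?_getD, List.getElem?_set_ne h, ← List.getD_eq_getElem?_getD]

lemma length_s2 (g : List (List (List Bool))) (y x : Nat) (c : List Bool) :
    (s2 g y x c).length = g.length := by
  simp [s2]

lemma rowlen_s2 (g : List (List (List Bool))) (y x : Nat) (c : List Bool) (y' : Nat) :
    ((s2 g y x c).getD y' []).length = (g.getD y' []).length := by
  unfold s2
  by_cases hy : y' = y
  · subst hy
    by_cases hl : y' < g.length
    · rw [getD_set_self _ _ _ _ hl, List.length_set]
    · rw [List.set_eq_of_length_le (by omega)]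
  · rw [getD_set_ne _ _ _ _ _ (Ne.symm hy)]

lemma g2_s2_self (g : List (List (List Bool))) (y x : Nat) (c : List Bool)
    (hy : y < g.length) (hx : x < (g.getD y []).length) :
    g2 (s2 g y x c) y x = c := by
  unfold g2 s2
  rw [getD_set_self _ _ _ _ hy, getD_set_self _ _ _ _ hx]

lemma g2_s2_ne (g : List (List (List Bool))) (y x : Nat) (c : List Bool) (y' x' : Nat)
    (h : ¬(y' = y ∧ x' = x)) :
    g2 (s2 g y x c) y' x' = g2 g y' x' := by
  unfold g2 s2
  by_cases hy : y' = y
  · subst hy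
    have hx : x' ≠ x := fun hh => h ⟨rfl, hh⟩
    by_cases hl : y' < g.length
    · rw [getD_set_self _ _ _ _ hl, getD_set_ne _ _ _ _ _ (Ne.symm hx)]
    · rw [List.set_eq_of_length_le (by omega)]
  · rw [getD_set_ne _ _ _ _ _ (Ne.symm hy)]

lemma s2_s2 (g : List (List (List Bool))) (y x : Nat) (c c' : List Bool)
    (hy : y < g.length) :
    s2 (s2 g y x c) y x c' = s2 g y x c' := by
  unfold s2
  have h1 : (g.set y ((g.getD y []).set x c)).getD y [] = (g.getD y []).set x c :=
    getD_set_self _ _ _ _ hy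
  rw [h1, List.set_set, List.set_set]

lemma s2_g2_self (g : List (List (List Bool))) (y x : Nat)
    (hy : y < g.length) (hx : x < (g.getD y []).length) :
    s2 g y x (g2 g y x) = g := by
  unfold s2 g2
  rw [List.getD_eq_getElem _ [] hx, List.set_getElem_self,
    List.getD_eq_getElem _ [] hy, List.set_getElem_self]

lemma fGet_eq (g : List (List (List Bool))) (y x : Int) (hy0 : 0 ≤ y) (hx0 : 0 ≤ x) :
    fGet g y x = g2 g y.toNat x.toNat := by
  unfold fGet g2
  rw [PySem.List.pyGetD_of_nonneg _ _ hy0, PySem.List.pyGetD_of_nonneg _ _ hx0]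

lemma fSet_eq (g : List (List (List Bool))) (y x : Int) (c : List Bool)
    (hy0 : 0 ≤ y) (hx0 : 0 ≤ x) :
    fSet g y x c = s2 g y.toNat x.toNat c := by
  unfold fSet s2
  rw [PySem.List.pySetD_of_nonneg _ _ hy0, PySem.List.pySetD_of_nonneg _ _ hx0,
    PySem.List.pyGetD_of_nonneg _ _ hy0]

lemma fWhile_eq (y x num : Int) (g : List (List (List Bool)))
    (hy0 : 0 ≤ y) (hx0 : 0 ≤ x)
    (hy : y.toNat < g.length) (hx : x.toNat < (g.getD y.toNat []).length) :
    fWhile y x num g = s2 g y.toNat x.toNat (whileCell num (g2 g y.toNat x.toNat)) := by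
  induction num, g using fWhile.induct y x with
  | case1 num g h ih =>
    rw [fWhile, dif_pos h]
    have h0 := PySem.Int.mod_nonneg (a := num) (b := 10) (by norm_num)
    rw [fGet_eq g y x hy0 hx0, PySem.List.pySetD_of_nonneg _ _ h0,
      fSet_eq g y x _ hy0 hx0] at ih ⊢
    rw [ih (by rw [length_s2]; exact hy) (by rw [rowlen_s2]; exact hx)]
    rw [g2_s2_self _ _ _ _ hy hx, s2_s2 _ _ _ _ _ hy]
    conv_rhs => rw [whileCell, dif_pos h]
  | case2 num g h =>
    rw [fWhile, dif_neg h]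
    conv_rhs => rw [whileCell, dif_neg h]
    rw [s2_g2_self _ _ _ hy hx]


-- ---- the digits grid of A, characterized cell by cell ----

def innerF (T : List (List Int)) (y a W : Int) (g : List (List (List Bool))) :
    List (List (List Bool)) :=
  (PySem.List.pyRange a W 1).foldl
    (fun g x => fWhile y x (PySem.List.pyGetD (PySem.List.pyGetD T y []) x 0) g) g

def outerF (T : List (List Int)) (b H W : Int) (g : List (List (List Bool))) :
    List (List (List Bool)) :=
  (PySem.List.pyRange b H 1).foldl (fun g y => innerF T y 0 W g) g

lemma inner_build (T : List (List Int)) (y W : Int) (hy0 : 0 ≤ y) :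
    ∀ (n : Nat) (a : Int) (g : List (List (List Bool))),
      (W - a).toNat = n → 0 ≤ a →
      y.toNat < g.length → ((g.getD y.toNat []).length : Int) = W →
      ((innerF T y a W g).length = g.length ∧
        (∀ y'' : Nat, ((innerF T y a W g).getD y'' []).length = (g.getD y'' []).length)) ∧
      (∀ y' x' : Nat,
        g2 (innerF T y a W g) y' x' =
          if y' = y.toNat ∧ a ≤ (x' : Int) ∧ (x' : Int) < W
          then whileCell (tval T y (x' : Int)) (g2 g y' x') else g2 g y' x') := by
  intro n
  induction n with
  | zero =>
    intro a g hn ha hy hrow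
    unfold innerF
    rw [PySem.List.pyRange_one_eq_nil (by omega)]
    simp only [List.foldl_nil]
    refine ⟨by simp, ?_⟩
    intro y' x'
    rw [if_neg (by rintro ⟨-, h2, h3⟩; omega)]
  | succ n ihn =>
    intro a g hn ha hy hrow
    have haW : a < W := by omega
    have hxa : a.toNat < (g.getD y.toNat []).length := by omega
    unfold innerF
    rw [PySem.List.pyRange_one_cons haW]
    simp only [List.foldl_cons]
    have hg1 : fWhile y a (PySem.List.pyGetD (PySem.List.pyGetD T y []) a 0) g =
        s2 g y.toNat a.toNat (whileCell (tval T y a) (g2 g y.toNat a.toNat)) :=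
      fWhile_eq y a _ g hy0 ha hy hxa
    rw [hg1]
    obtain ⟨⟨hlen, hrows⟩, hcells⟩ :=
      ihn (a + 1) (s2 g y.toNat a.toNat (whileCell (tval T y a) (g2 g y.toNat a.toNat)))
        (by omega) (by omega)
        (by rw [length_s2]; exact hy)
        (by rw [rowlen_s2]; exact hrow)
    refine ⟨⟨by rw [innerF] at hlen; rw [hlen, length_s2],
      fun y'' => by rw [innerF] at hrows; rw [hrows y'', rowlen_s2]⟩, ?_⟩
    intro y' x'
    rw [innerF] at hcells
    rw [hcells y' x']
    by_cases hcase : y' = y.toNat ∧ a + 1 ≤ (x' : Int) ∧ (x' : Int) < W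
    · rw [if_pos hcase, if_pos ⟨hcase.1, by omega, hcase.2.2⟩,
        g2_s2_ne _ _ _ _ _ _ (by rintro ⟨-, hh⟩; omega)]
    · rw [if_neg hcase]
      by_cases heq : y' = y.toNat ∧ x' = a.toNat
      · obtain ⟨h1, h2⟩ := heq
        subst h1; subst h2
        rw [g2_s2_self _ _ _ _ hy hxa, if_pos ⟨rfl, by omega, by omega⟩]
        congr 1
        rw [show ((a.toNat : Nat) : Int) = a from by omega]
      · rw [g2_s2_ne _ _ _ _ _ _ heq, if_neg ?_]
        rintro ⟨h1, h2, h3⟩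
        have hne : x' ≠ a.toNat := fun hh => heq ⟨h1, hh⟩
        exact hcase ⟨h1, by omega, h3⟩

lemma outer_build (T : List (List Int)) (H W : Int) :
    ∀ (n : Nat) (b : Int) (g : List (List (List Bool))),
      (H - b).toNat = n → 0 ≤ b →
      (g.length : Int) = H →
      (∀ y'' : Nat, y'' < g.length → ((g.getD y'' []).length : Int) = W) →
      ((outerF T b H W g).length = g.length ∧
        (∀ y'' : Nat, ((outerF T b H W g).getD y'' []).length = (g.getD y'' []).length)) ∧
      (∀ y' x' : Nat,
        g2 (outerF T b H W g) y' x' =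
          if b ≤ (y' : Int) ∧ (y' : Int) < H ∧ (x' : Int) < W
          then whileCell (tval T (y' : Int) (x' : Int)) (g2 g y' x') else g2 g y' x') := by
  intro n
  induction n with
  | zero =>
    intro b g hn hb hlen hrows
    unfold outerF
    rw [PySem.List.pyRange_one_eq_nil (by omega)]
    simp only [List.foldl_nil]
    refine ⟨by simp, ?_⟩
    intro y' x'
    rw [if_neg (by rintro ⟨h1, h2, h3⟩; omega)]
  | succ n ihn =>
    intro b g hn hb hlen hrows
    have hbH : b < H := by omega
    unfold outerF
    rw [PySem.List.pyRange_one_cons hbH]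
    simp only [List.foldl_cons]
    have hbg : b.toNat < g.length := by omega
    obtain ⟨⟨ilen, irows⟩, icells⟩ :=
      inner_build T b W hb (W - 0).toNat 0 g rfl (by omega) hbg (hrows b.toNat hbg)
    obtain ⟨⟨olen, orows⟩, ocells⟩ :=
      ihn (b + 1) (innerF T b 0 W g) (by omega) (by omega) (by rw [ilen]; exact hlen)
        (fun y'' hy'' => by rw [irows y'']; exact hrows y'' (by rwa [ilen] at hy''))
    refine ⟨⟨by rw [outerF] at olen; rw [olen, ilen],
      fun y'' => by rw [outerF] at orows; rw [orows y'', irows y'']⟩, ?_⟩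
    intro y' x'
    rw [outerF] at ocells
    rw [ocells y' x']
    by_cases hcase : b + 1 ≤ (y' : Int) ∧ (y' : Int) < H ∧ (x' : Int) < W
    · rw [if_pos hcase, if_pos ⟨by omega, hcase.2.1, hcase.2.2⟩,
        icells y' x', if_neg (by rintro ⟨h1, -, -⟩; omega)]
    · rw [if_neg hcase]
      by_cases heq : y' = b.toNat ∧ (x' : Int) < W
      · obtain ⟨h1, h2⟩ := heq
        subst h1
        rw [icells _ x', if_pos ⟨rfl, by omega, h2⟩, if_pos ⟨by omega, by omega, h2⟩]
        congr 2
        omega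
      · rw [icells y' x', if_neg (by rintro ⟨h1, -, h3⟩; exact heq ⟨h1, h3⟩),
          if_neg ?_]
        rintro ⟨h1, h2, h3⟩
        by_cases hyb : y' = b.toNat
        · exact heq ⟨hyb, h3⟩
        · exact hcase ⟨by omega, h2, h3⟩

def digitsOf (T : List (List Int)) : List (List (List Bool)) :=
  outerF T 0 (PySem.List.len T) (PySem.List.len (PySem.List.pyGetD T 0 []))
    ((PySem.List.pyRange 0 (PySem.List.len T) 1).map (fun _ =>
      (PySem.List.pyRange 0 (PySem.List.len (PySem.List.pyGetD T 0 [])) 1).map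
        (fun _ => List.replicate 10 false)))

lemma getD_replicate' {α : Type} (n : Nat) (a d : α) (i : Nat) (h : i < n) :
    (List.replicate n a).getD i d = a := by
  rw [List.getD_eq_getElem?_getD, List.getElem?_replicate, if_pos h, Option.getD_some]

lemma digits_cell (T : List (List Int)) (y x : Int)
    (hy : 0 ≤ y) (hyH : y < PySem.List.len T)
    (hx : 0 ≤ x) (hxW : x < PySem.List.len (PySem.List.pyGetD T 0 [])) :
    fGet (digitsOf T) y x = whileCell (tval T y x) (List.replicate 10 false) := by
  have hH0 : (0 : Int) ≤ PySem.List.len T := by simp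
  have hW0 : (0 : Int) ≤ PySem.List.len (PySem.List.pyGetD T 0 []) := by simp
  have hg0 : ((PySem.List.pyRange 0 (PySem.List.len T) 1).map (fun _ =>
      (PySem.List.pyRange 0 (PySem.List.len (PySem.List.pyGetD T 0 [])) 1).map
        (fun _ => List.replicate 10 false))) =
      List.replicate (PySem.List.len T).toNat
        (List.replicate (PySem.List.len (PySem.List.pyGetD T 0 [])).toNat
          (List.replicate 10 false)) := by
    rw [List.map_const', List.map_const', PySem.List.length_pyRange_one,
      PySem.List.length_pyRange_one]
    norm_num
  obtain ⟨-, ocells⟩ := outer_build T (PySem.List.len T)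
    (PySem.List.len (PySem.List.pyGetD T 0 []))
    (PySem.List.len T - 0).toNat 0
    ((PySem.List.pyRange 0 (PySem.List.len T) 1).map (fun _ =>
      (PySem.List.pyRange 0 (PySem.List.len (PySem.List.pyGetD T 0 [])) 1).map
        (fun _ => List.replicate 10 false))) rfl le_rfl
    (by rw [hg0, List.length_replicate]; omega)
    (fun y'' hy'' => by
      rw [hg0] at hy'' ⊢
      rw [getD_replicate' _ _ _ _ (by simpa using hy''), List.length_replicate]
      omega)
  rw [fGet_eq _ y x hy hx]
  unfold digitsOf
  rw [ocells y.toNat x.toNat, if_pos ⟨by omega, by omega, by omega⟩, hg0,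
    g2, getD_replicate' _ _ _ _ (by omega), getD_replicate' _ _ _ _ (by omega)]
  congr 2 <;> omega

-- ---- the disqualified set of B, characterized ----

def MOf (T : List (List Int)) : List (List (List Int)) :=
  (PySem.List.pyRange 0 (PySem.List.len T) 1).map (fun y =>
    (PySem.List.pyRange 0 (PySem.List.len (PySem.List.pyGetD T 0 [])) 1).map (fun x =>
      digitKey (PySem.List.pyGetD (PySem.List.pyGetD T y []) x 0)))

def disqOf (T : List (List Int)) : PySem.Set (Int × Int) :=
  (PySem.List.pyRange 0 (PySem.List.len T - 1) 1).foldl (fun s y =>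
    (PySem.List.pyRange 0 (PySem.List.len (PySem.List.pyGetD T 0 [])) 1).foldl (fun s x =>
      if PySem.List.pyGetD (PySem.List.pyGetD (MOf T) y []) x [] ≠
          PySem.List.pyGetD (PySem.List.pyGetD (MOf T) (y + 1) []) x [] then
        PySem.Set.add (PySem.Set.add s (y, x)) (y + 1, x)
      else s) s)
  ((PySem.List.pyRange 0 (PySem.List.len T) 1).foldl (fun s y =>
    (PySem.List.pyRange 0 (PySem.List.len (PySem.List.pyGetD T 0 []) - 1) 1).foldl (fun s x =>
      if PySem.List.pyGetD (PySem.List.pyGetD (MOf T) y []) x [] ≠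
          PySem.List.pyGetD (PySem.List.pyGetD (MOf T) y []) (x + 1) [] then
        PySem.Set.add (PySem.Set.add s (y, x)) (y, x + 1)
      else s) s) PySem.Set.empty)

lemma getM_eq (T : List (List Int)) (y x : Int)
    (hy0 : 0 ≤ y) (hyH : y < PySem.List.len T)
    (hx0 : 0 ≤ x) (hxW : x < PySem.List.len (PySem.List.pyGetD T 0 [])) :
    PySem.List.pyGetD (PySem.List.pyGetD (MOf T) y []) x [] = keyAt T y x := by
  unfold MOf keyAt tval
  rw [PySem.List.pyGetD_map_pyRange_of_nonneg _ _ _ _ hy0 (by simpa using hyH),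
    PySem.List.pyGetD_map_pyRange_of_nonneg _ _ _ _ hx0 (by simpa using hxW)]

lemma mem_foldl_iff {β γ : Type} (l : List β) (step : List γ → β → List γ) (Q : β → Prop)
    (c : γ) (h : ∀ s e, e ∈ l → (c ∈ step s e ↔ c ∈ s ∨ Q e)) :
    ∀ s0, c ∈ l.foldl step s0 ↔ c ∈ s0 ∨ ∃ e ∈ l, Q e := by
  induction l with
  | nil => simp
  | cons hd tl ih =>
    intro s0
    rw [List.foldl_cons, ih (fun s e he => h s e (List.mem_cons_of_mem _ he)) (step s0 hd),
      h s0 hd List.mem_cons_self]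
    constructor
    · rintro ((hc | hq) | ⟨e, he, hq⟩)
      · exact Or.inl hc
      · exact Or.inr ⟨hd, List.mem_cons_self, hq⟩
      · exact Or.inr ⟨e, List.mem_cons_of_mem _ he, hq⟩
    · rintro (hc | ⟨e, he, hq⟩)
      · exact Or.inl (Or.inl hc)
      · rcases List.mem_cons.mp he with rfl | he'
        · exact Or.inl (Or.inr hq)
        · exact Or.inr ⟨e, he', hq⟩

-- the two edge events: c is an endpoint of a differing horizontal / vertical adjacent pair
def EHp (T : List (List Int)) (c : Int × Int) : Prop :=
  ∃ y ∈ PySem.List.pyRange 0 (PySem.List.len T) 1,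
    ∃ x ∈ PySem.List.pyRange 0 (PySem.List.len (PySem.List.pyGetD T 0 []) - 1) 1,
      keyAt T y x ≠ keyAt T y (x + 1) ∧ (c = (y, x) ∨ c = (y, x + 1))

def EVp (T : List (List Int)) (c : Int × Int) : Prop :=
  ∃ y ∈ PySem.List.pyRange 0 (PySem.List.len T - 1) 1,
    ∃ x ∈ PySem.List.pyRange 0 (PySem.List.len (PySem.List.pyGetD T 0 [])) 1,
      keyAt T y x ≠ keyAt T (y + 1) x ∧ (c = (y, x) ∨ c = (y + 1, x))

lemma mem_disqOf (T : List (List Int)) (c : Int × Int) :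
    c ∈ disqOf T ↔ EHp T c ∨ EVp T c := by
  unfold disqOf
  rw [mem_foldl_iff _ _
    (fun y => ∃ x ∈ PySem.List.pyRange 0 (PySem.List.len (PySem.List.pyGetD T 0 [])) 1,
      keyAt T y x ≠ keyAt T (y + 1) x ∧ (c = (y, x) ∨ c = (y + 1, x))) c ?hv,
    mem_foldl_iff _ _
    (fun y => ∃ x ∈ PySem.List.pyRange 0 (PySem.List.len (PySem.List.pyGetD T 0 []) - 1) 1,
      keyAt T y x ≠ keyAt T y (x + 1) ∧ (c = (y, x) ∨ c = (y, x + 1))) c ?hh PySem.Set.empty]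
  case hv =>
    intro s y hy
    have hyb := (PySem.List.mem_pyRange_one).mp hy
    rw [mem_foldl_iff _ _
      (fun x => keyAt T y x ≠ keyAt T (y + 1) x ∧ (c = (y, x) ∨ c = (y + 1, x))) c ?_ s]
    intro s' x hx
    have hxb := (PySem.List.mem_pyRange_one).mp hx
    rw [getM_eq T y x (by omega) (by omega) (by omega) (by omega),
      getM_eq T (y + 1) x (by omega) (by omega) (by omega) (by omega)]
    by_cases hk : keyAt T y x ≠ keyAt T (y + 1) x
    · rw [if_pos hk]
      simp only [PySem.Set.mem_add]
      tauto
    · rw [if_neg hk]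
      tauto
  case hh =>
    intro s y hy
    have hyb := (PySem.List.mem_pyRange_one).mp hy
    rw [mem_foldl_iff _ _
      (fun x => keyAt T y x ≠ keyAt T y (x + 1) ∧ (c = (y, x) ∨ c = (y, x + 1))) c ?_ s]
    intro s' x hx
    have hxb := (PySem.List.mem_pyRange_one).mp hx
    rw [getM_eq T y x (by omega) (by omega) (by omega) (by omega),
      getM_eq T y (x + 1) (by omega) (by omega) (by omega) (by omega)]
    by_cases hk : keyAt T y x ≠ keyAt T y (x + 1)
    · rw [if_pos hk]
      simp only [PySem.Set.mem_add]
      tauto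
    · rw [if_neg hk]
      tauto
  unfold EHp EVp
  constructor
  · rintro ((hf | hh) | hv)
    · exact absurd hf (List.not_mem_nil)
    · exact Or.inl hh
    · exact Or.inr hv
  · rintro (hh | hv)
    · exact Or.inl (Or.inr hh)
    · exact Or.inr hv

-- ---- per-cell equivalence of the two counting bodies ----

lemma percell (T : List (List Int)) (y x : Int)
    (hy0 : 0 ≤ y) (hyH : y < PySem.List.len T)
    (hx0 : 0 ≤ x) (hxW : x < PySem.List.len (PySem.List.pyGetD T 0 [])) (c : Int) :
    (if x ≠ 0 ∧ fGet (digitsOf T) y x ≠ fGet (digitsOf T) y (x - 1) then c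
     else if y ≠ 0 ∧ fGet (digitsOf T) y x ≠ fGet (digitsOf T) (y - 1) x then c
     else if x ≠ PySem.List.len (PySem.List.pyGetD T 0 []) - 1 ∧
         fGet (digitsOf T) y x ≠ fGet (digitsOf T) y (x + 1) then c
     else if y ≠ PySem.List.len T - 1 ∧
         fGet (digitsOf T) y x ≠ fGet (digitsOf T) (y + 1) x then c
     else c + 1)
    = if (y, x) ∉ disqOf T then c + 1 else c := by
  have hEq : ∀ y1 x1 y2 x2 : Int,
      0 ≤ y1 → y1 < PySem.List.len T → 0 ≤ x1 → x1 < PySem.List.len (PySem.List.pyGetD T 0 []) →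
      0 ≤ y2 → y2 < PySem.List.len T → 0 ≤ x2 → x2 < PySem.List.len (PySem.List.pyGetD T 0 []) →
      (fGet (digitsOf T) y1 x1 = fGet (digitsOf T) y2 x2 ↔ keyAt T y1 x1 = keyAt T y2 x2) := by
    intro y1 x1 y2 x2 a1 a2 a3 a4 a5 a6 a7 a8
    rw [digits_cell T y1 x1 a1 a2 a3 a4, digits_cell T y2 x2 a5 a6 a7 a8]
    exact cell_eq_iff_key_eq _ _
  by_cases h1 : x ≠ 0 ∧ fGet (digitsOf T) y x ≠ fGet (digitsOf T) y (x - 1)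
  · have hmem : (y, x) ∈ disqOf T := by
      rw [mem_disqOf]
      refine Or.inl ⟨y, (PySem.List.mem_pyRange_one).mpr ⟨by omega, by omega⟩,
        x - 1, (PySem.List.mem_pyRange_one).mpr ⟨by omega, by omega⟩, ?_,
        Or.inr (by rw [sub_add_cancel])⟩
      rw [sub_add_cancel]
      intro hk
      exact h1.2 ((hEq y x y (x - 1) hy0 hyH hx0 hxW hy0 hyH (by omega) (by omega)).mpr hk.symm)
    rw [if_pos h1, if_neg (not_not_intro hmem)]
  · by_cases h2 : y ≠ 0 ∧ fGet (digitsOf T) y x ≠ fGet (digitsOf T) (y - 1) x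
    · have hmem : (y, x) ∈ disqOf T := by
        rw [mem_disqOf]
        refine Or.inr ⟨y - 1, (PySem.List.mem_pyRange_one).mpr ⟨by omega, by omega⟩,
          x, (PySem.List.mem_pyRange_one).mpr ⟨by omega, by omega⟩, ?_,
          Or.inr (by rw [sub_add_cancel])⟩
        rw [sub_add_cancel]
        intro hk
        exact h2.2 ((hEq y x (y - 1) x hy0 hyH hx0 hxW (by omega) (by omega) hx0 hxW).mpr hk.symm)
      rw [if_neg h1, if_pos h2, if_neg (not_not_intro hmem)]
    · by_cases h3 : x ≠ PySem.List.len (PySem.List.pyGetD T 0 []) - 1 ∧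
          fGet (digitsOf T) y x ≠ fGet (digitsOf T) y (x + 1)
      · have hmem : (y, x) ∈ disqOf T := by
          rw [mem_disqOf]
          refine Or.inl ⟨y, (PySem.List.mem_pyRange_one).mpr ⟨by omega, by omega⟩,
            x, (PySem.List.mem_pyRange_one).mpr ⟨by omega, ?_⟩, ?_, Or.inl rfl⟩
          · have := h3.1
            omega
          · intro hk
            exact h3.2 ((hEq y x y (x + 1) hy0 hyH hx0 hxW hy0 hyH (by omega)
              (by omega)).mpr hk)
        rw [if_neg h1, if_neg h2, if_pos h3, if_neg (not_not_intro hmem)]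
      · by_cases h4 : y ≠ PySem.List.len T - 1 ∧
            fGet (digitsOf T) y x ≠ fGet (digitsOf T) (y + 1) x
        · have hmem : (y, x) ∈ disqOf T := by
            rw [mem_disqOf]
            refine Or.inr ⟨y, (PySem.List.mem_pyRange_one).mpr ⟨by omega, ?_⟩,
              x, (PySem.List.mem_pyRange_one).mpr ⟨by omega, by omega⟩, ?_, Or.inl rfl⟩
            · have := h4.1
              omega
            · intro hk
              exact h4.2 ((hEq y x (y + 1) x hy0 hyH hx0 hxW (by omega) (by omega)
                hx0 hxW).mpr hk)
          rw [if_neg h1, if_neg h2, if_neg h3, if_pos h4, if_neg (not_not_intro hmem)]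
        · have hnot : (y, x) ∉ disqOf T := by
            rw [mem_disqOf]
            push Not at h1 h2 h3 h4
            rintro (⟨y0, hy0m, x0, hx0m, hdiff, hend⟩ | ⟨y0, hy0m, x0, hx0m, hdiff, hend⟩)
            · have hyb := (PySem.List.mem_pyRange_one).mp hy0m
              have hxb := (PySem.List.mem_pyRange_one).mp hx0m
              rcases hend with hpair | hpair
              · rw [Prod.mk.injEq] at hpair
                rw [← hpair.1, ← hpair.2] at hdiff
                exact hdiff ((hEq y x y (x + 1) hy0 hyH hx0 hxW hy0 hyH (by omega)
                  (by omega)).mp (h3 (by omega)))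
              · rw [Prod.mk.injEq] at hpair
                have hx' : x0 = x - 1 := by omega
                rw [← hpair.1, hx', sub_add_cancel] at hdiff
                have hxb' : 0 ≤ x0 := hxb.1
                exact hdiff (((hEq y x y (x - 1) hy0 hyH hx0 hxW hy0 hyH (by omega)
                  (by omega)).mp (h1 (by omega))).symm)
            · have hyb := (PySem.List.mem_pyRange_one).mp hy0m
              have hxb := (PySem.List.mem_pyRange_one).mp hx0m
              rcases hend with hpair | hpair
              · rw [Prod.mk.injEq] at hpair
                rw [← hpair.1, ← hpair.2] at hdiff
                exact hdiff ((hEq y x (y + 1) x hy0 hyH hx0 hxW (by omega) (by omega)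
                  hx0 hxW).mp (h4 (by omega)))
              · rw [Prod.mk.injEq] at hpair
                have hy' : y0 = y - 1 := by omega
                have hyb' : 0 ≤ y0 := hyb.1
                rw [← hpair.2, hy', sub_add_cancel] at hdiff
                exact hdiff (((hEq y x (y - 1) x hy0 hyH hx0 hxW (by omega) (by omega)
                  hx0 hxW).mp (h2 (by omega))).symm)
          rw [if_neg h1, if_neg h2, if_neg h3, if_neg h4, if_pos hnot]

-- ---- the two programs, written with the named grid / set ----

lemma f_eq (T : List (List Int)) :
    f T = (PySem.List.pyRange 0 (PySem.List.len T) 1).foldl (fun c y =>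
      (PySem.List.pyRange 0 (PySem.List.len (PySem.List.pyGetD T 0 [])) 1).foldl (fun c x =>
        if x ≠ 0 ∧ fGet (digitsOf T) y x ≠ fGet (digitsOf T) y (x - 1) then c
        else if y ≠ 0 ∧ fGet (digitsOf T) y x ≠ fGet (digitsOf T) (y - 1) x then c
        else if x ≠ PySem.List.len (PySem.List.pyGetD T 0 []) - 1 ∧
            fGet (digitsOf T) y x ≠ fGet (digitsOf T) y (x + 1) then c
        else if y ≠ PySem.List.len T - 1 ∧
            fGet (digitsOf T) y x ≠ fGet (digitsOf T) (y + 1) x then c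
        else c + 1) c) 0 := rfl

lemma f_alt_eq (T : List (List Int)) :
    f_alt T = (PySem.List.pyRange 0 (PySem.List.len T) 1).foldl (fun c y =>
      (PySem.List.pyRange 0 (PySem.List.len (PySem.List.pyGetD T 0 [])) 1).foldl (fun c x =>
        if (y, x) ∉ disqOf T then c + 1 else c) c) 0 := rfl

-- ===== VERDICT (by name: the statement is the Claim_ definition above) =====
theorem f_spec : Claim_equal_f := by
  unfold Claim_equal_f
  intro T _ _
  unfold Spec_f
  rw [f_eq, f_alt_eq]
  apply PySem.List.foldl_congr_mem
  intro acc y hy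
  apply PySem.List.foldl_congr_mem
  intro acc2 x hx
  have hyb := (PySem.List.mem_pyRange_one).mp hy
  have hxb := (PySem.List.mem_pyRange_one).mp hx
  exact percell T y x hyb.1 hyb.2 hxb.1 hxb.2 acc2
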